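-- pv_equiv track=rewrite | github.com/Alirzeanoroozi/PRISM | benchmark/scripts/gtalign_prism_alignment_test.py | _extract_gtalign_query_path
-- ===== SOURCE A (Python) =====
-- def _extract_gtalign_query_path(lines):
--     for i, line in enumerate(lines):
--         if line.startswith(" Query ("):
--             j = i + 1
--             while j < len(lines) and not lines[j].startswith(" Searched:"):
--                 candidate = lines[j].strip()
--                 if candidate and not candidate.startswith("Chn:"):
--                     return candidate.split(" Chn:", 1)[0].strip()
--                 j += 1
--     return None
-- ===== SOURCE B (Python) =====
-- def _extract_gtalign_query_path(lines):
--     # Single flat state-machine pass instead of nested index loops.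
--     in_block = False
--     for line in lines:
--         if not in_block:
--             if line.startswith(" Query ("):
--                 in_block = True
--         elif line.startswith(" Searched:"):
--             in_block = False
--         else:
--             candidate = line.strip()
--             if candidate and not candidate.startswith("Chn:"):
--                 return candidate.split(" Chn:", 1)[0].strip()
--     return None
-- ===== Notes on version B (the rewrite author's own statement) =====
-- stated objective: simpler
-- what changed: Replaced the nested enumerate-loop with an inner index while-scan by a single flat linear pass over the lines maintaining one boolean in_block state flag.
import Mathlib
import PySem

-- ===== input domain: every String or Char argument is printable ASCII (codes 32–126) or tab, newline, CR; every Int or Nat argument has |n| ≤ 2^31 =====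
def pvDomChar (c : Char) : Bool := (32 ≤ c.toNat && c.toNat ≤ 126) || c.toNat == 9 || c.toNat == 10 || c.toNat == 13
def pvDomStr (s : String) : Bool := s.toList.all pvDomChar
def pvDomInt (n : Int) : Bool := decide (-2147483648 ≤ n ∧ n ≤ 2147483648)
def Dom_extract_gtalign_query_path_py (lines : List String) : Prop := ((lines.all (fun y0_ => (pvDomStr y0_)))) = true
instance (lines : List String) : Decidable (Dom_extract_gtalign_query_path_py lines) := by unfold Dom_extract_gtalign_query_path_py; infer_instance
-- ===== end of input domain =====

-- B replaces A's nested loops by one linear pass with a boolean state flag (simpler, same return value).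

-- ===== PORT A =====
-- the shared Python return expression: candidate.split(" Chn:", 1)[0].strip()
-- (split with a nonempty separator always yields a nonempty list, so the [0] never raises;
--  getD []/headD "" are unreachable defaults standing for that)
def pvResult (candidate : String) : String :=
  PySem.Str.strip (((PySem.Str.splitMax? candidate " Chn:" 1).getD []).headD "")

-- the inner 'while j < len(lines) and not lines[j].startswith(" Searched:")' loop;
-- none = the while ended (break on " Searched:" or j = len) without returning
def pvAInner (lines : List String) (j : Nat) : Option String :=
  if h : j < lines.length then
    if PySem.Str.startswith lines[j] " Searched:" then none
    else
      let candidate := PySem.Str.strip lines[j]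
      if candidate != "" && !(PySem.Str.startswith candidate "Chn:") then
        some (pvResult candidate)
      else pvAInner lines (j + 1)
  else none
termination_by lines.length - j

-- the outer 'for i, line in enumerate(lines)' loop
def pvAOuter (lines : List String) (i : Nat) : Option String :=
  if h : i < lines.length then
    if PySem.Str.startswith lines[i] " Query (" then
      match pvAInner lines (i + 1) with
      | some r => some r
      | none => pvAOuter lines (i + 1)
    else pvAOuter lines (i + 1)
  else none
termination_by lines.length - i

def extract_gtalign_query_path_py (lines : List String) : Option String :=
  pvAOuter lines 0

-- ===== PORT B =====
-- single pass over the remaining lines, carrying the in_block flag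
def pvBLoop : List String → Bool → Option String
  | [], _ => none
  | line :: rest, false =>
      if PySem.Str.startswith line " Query (" then pvBLoop rest true
      else pvBLoop rest false
  | line :: rest, true =>
      if PySem.Str.startswith line " Searched:" then pvBLoop rest false
      else
        let candidate := PySem.Str.strip line
        if candidate != "" && !(PySem.Str.startswith candidate "Chn:") then
          some (pvResult candidate)
        else pvBLoop rest true

def extract_gtalign_query_path_py_alt (lines : List String) : Option String :=
  pvBLoop lines false

-- ===== PRECONDITION & SPEC =====
def Spec_extract_gtalign_query_path_py (lines : List String) (out : Option String) : Prop := out = extract_gtalign_query_path_py_alt lines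
instance (lines : List String) (out : Option String) : Decidable (Spec_extract_gtalign_query_path_py lines out) := by unfold Spec_extract_gtalign_query_path_py; infer_instance

-- ===== CLAIM (what is proved, stated in full; the proofs are below) =====
def Claim_equal_extract_gtalign_query_path_py : Prop := ∀ (lines : List String), Dom_extract_gtalign_query_path_py lines → Spec_extract_gtalign_query_path_py lines (extract_gtalign_query_path_py lines)

-- ===== LEMMAS AND PROOFS =====

-- a line starting with " Searched:" cannot also start with " Query ("
theorem pv_searched_not_query (s : String)
    (h : PySem.Str.startswith s " Searched:" = true) :
    PySem.Str.startswith s " Query (" = false := by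
  by_contra hq
  rw [Bool.not_eq_false] at hq
  rw [PySem.Str.startswith_eq, PySem.Chars.startswith_iff] at h hq
  rcases List.prefix_or_prefix_of_prefix hq h with hp | hp
  · exact absurd hp (by decide)
  · exact absurd hp (by decide)

-- the main invariant, by induction on the remaining length:
-- outer-mode equality, and the in-block pass equals the inner while followed by the resumed outer loop
theorem pv_key (lines : List String) : ∀ (n j : Nat), lines.length - j = n →
    (pvAOuter lines j = pvBLoop (lines.drop j) false) ∧
    (pvBLoop (lines.drop j) true = (pvAInner lines j).elim (pvAOuter lines j) some) := by
  intro n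
  induction n with
  | zero =>
      intro j hj
      have hge : lines.length ≤ j := by omega
      have hd : lines.drop j = [] := List.drop_eq_nil_of_le hge
      have h1 : pvAOuter lines j = none := by
        rw [pvAOuter]; exact dif_neg (Nat.not_lt.mpr hge)
      have h2 : pvAInner lines j = none := by
        rw [pvAInner]; exact dif_neg (Nat.not_lt.mpr hge)
      rw [hd, h1, h2]
      exact ⟨rfl, rfl⟩
  | succ n ih =>
      intro j hj
      have hlt : j < lines.length := by omega
      have hd : lines.drop j = lines[j] :: lines.drop (j + 1) :=
        List.drop_eq_getElem_cons hlt
      obtain ⟨ihM, ihN⟩ := ih (j + 1) (by omega)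
      constructor
      · -- outer mode
        rw [pvAOuter, dif_pos hlt, hd]
        simp only [pvBLoop]
        by_cases hq : PySem.Str.startswith lines[j] " Query (" = true
        · rw [if_pos hq, if_pos hq, ihN]
          cases pvAInner lines (j + 1) <;> rfl
        · rw [if_neg hq, if_neg hq, ihM]
      · -- in-block mode
        rw [pvAInner, dif_pos hlt, hd]
        simp only [pvBLoop]
        by_cases hs : PySem.Str.startswith lines[j] " Searched:" = true
        · rw [if_pos hs, if_pos hs, ihM.symm]
          simp only [Option.elim]
          -- pvAOuter j = pvAOuter (j+1): the " Searched:" line does not start with " Query ("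
          conv_rhs => rw [pvAOuter]
          rw [dif_pos hlt, if_neg (by simp only [pv_searched_not_query _ hs]; decide)]
        · rw [if_neg hs, if_neg hs]
          by_cases hc : (PySem.Str.strip lines[j] != "" &&
              !(PySem.Str.startswith (PySem.Str.strip lines[j]) "Chn:")) = true
          · rw [if_pos hc, if_pos hc]
            rfl
          · rw [if_neg hc, if_neg hc, ihN]
            cases hInner : pvAInner lines (j + 1) with
            | some r => rfl
            | none =>
                simp only [Option.elim]
                -- pvAOuter j = pvAOuter (j+1) whether or not lines[j] starts with " Query ("
                conv_rhs => rw [pvAOuter]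
                rw [dif_pos hlt]
                by_cases hq : PySem.Str.startswith lines[j] " Query (" = true
                · rw [if_pos hq, hInner]
                · rw [if_neg hq]

-- ===== VERDICT (by name: the statement is the Claim_ definition above) =====
theorem extract_gtalign_query_path_py_spec : Claim_equal_extract_gtalign_query_path_py := by
  intro lines _
  unfold Spec_extract_gtalign_query_path_py extract_gtalign_query_path_py
    extract_gtalign_query_path_py_alt
  have := (pv_key lines (lines.length - 0) 0 rfl).1
  simpa using this
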